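-- pv_equiv track=rewrite | github.com/MLGBJDLW/ouroboros | .ouroboros/scripts/input/commands.py | is_valid_slash_command
-- ===== SOURCE A (Python) =====
-- from typing import List, Tuple, Optional, Dict
--
-- SLASH_COMMANDS: Dict[str, Dict[str, str]] = {
--     "/ouroboros":           {"desc": "Main Orchestrator", "file": "ouroboros.agent.md"},
--     "/ouroboros-init":      {"desc": "Project Init", "file": "ouroboros-init.agent.md"},
--     "/ouroboros-spec":      {"desc": "Spec Workflow", "file": "ouroboros-spec.agent.md"},
--     "/ouroboros-implement": {"desc": "Implementation", "file": "ouroboros-implement.agent.md"},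
--     "/ouroboros-archive":   {"desc": "Archive Specs", "file": "ouroboros-archive.agent.md"},
-- }
--
-- def is_valid_slash_command(text: str) -> bool:
--     """
--     Check if text starts with a valid slash command.
--
--     Args:
--         text: The text to check
--
--     Returns:
--         True if text starts with a valid slash command
--     """
--     text_stripped = text.strip()
--     for cmd in SLASH_COMMANDS:
--         if text_stripped.startswith(cmd):
--             rest = text_stripped[len(cmd):]
--             if not rest or rest[0] in (' ', '\n', '\t'):
--                 return True
--     return False
-- ===== SOURCE B (Python) =====
-- from typing import Dict
--
-- SLASH_COMMANDS: Dict[str, Dict[str, str]] = {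
--     "/ouroboros":           {"desc": "Main Orchestrator", "file": "ouroboros.agent.md"},
--     "/ouroboros-init":      {"desc": "Project Init", "file": "ouroboros-init.agent.md"},
--     "/ouroboros-spec":      {"desc": "Spec Workflow", "file": "ouroboros-spec.agent.md"},
--     "/ouroboros-implement": {"desc": "Implementation", "file": "ouroboros-implement.agent.md"},
--     "/ouroboros-archive":   {"desc": "Archive Specs", "file": "ouroboros-archive.agent.md"},
-- }
--
-- def is_valid_slash_command(text: str) -> bool:
--     """Extract the leading token (up to the first ' ', '\n' or '\t') of the
--     stripped text and test it with a single dict membership."""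
--     text_stripped = text.strip()
--     token_chars = []
--     for ch in text_stripped:
--         if ch in ' \n\t':
--             break
--         token_chars.append(ch)
--     return ''.join(token_chars) in SLASH_COMMANDS
-- ===== Notes on version B (the rewrite author's own statement) =====
-- stated objective: simpler
-- what changed: B extracts the leading token of the stripped text once (scan up to the first ' ', '\n' or '\t') and does a single dict membership test, instead of A's per-command startswith loop with a separator check on the remainder.
import Mathlib
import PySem

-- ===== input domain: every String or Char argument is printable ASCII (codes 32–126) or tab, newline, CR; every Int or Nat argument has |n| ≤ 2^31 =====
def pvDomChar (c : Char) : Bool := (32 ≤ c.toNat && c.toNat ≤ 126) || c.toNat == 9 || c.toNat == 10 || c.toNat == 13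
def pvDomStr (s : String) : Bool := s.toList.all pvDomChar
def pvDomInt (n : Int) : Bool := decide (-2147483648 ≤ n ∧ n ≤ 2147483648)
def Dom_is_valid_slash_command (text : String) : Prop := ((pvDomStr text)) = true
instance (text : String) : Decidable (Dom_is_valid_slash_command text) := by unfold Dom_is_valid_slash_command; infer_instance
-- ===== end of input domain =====

-- B replaces A's per-command startswith loop by one leading-token extraction plus a single membership test (simpler; same result).

-- ===== PORT A =====
-- the keys of SLASH_COMMANDS, in insertion order
def pvSlashCmdsA : List (List Char) :=
  ["/ouroboros".toList, "/ouroboros-init".toList, "/ouroboros-spec".toList,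
   "/ouroboros-implement".toList, "/ouroboros-archive".toList]

-- rest[0] in (' ', '\n', '\t')
def pvSepA (c : Char) : Bool := c = ' ' || c = '\n' || c = '\t'

-- "not rest or rest[0] in (' ', '\n', '\t')"
def pvRestOkA (r : List Char) : Bool :=
  match r with
  | [] => true
  | c :: _ => pvSepA c

-- the 'for cmd in SLASH_COMMANDS' loop with its early 'return True'
def pvLoopA (cmds : List (List Char)) (t : List Char) : Bool :=
  match cmds with
  | [] => false
  | cmd :: rest =>
    if PySem.Chars.startswith t cmd then
      -- rest = text_stripped[len(cmd):]
      if pvRestOkA (PySem.List.slice t (some (cmd.length : Int)) none) then true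
      else pvLoopA rest t
    else pvLoopA rest t

def is_valid_slash_command (text : String) : Bool :=
  pvLoopA pvSlashCmdsA (PySem.Str.strip text).toList

-- ===== PORT B =====
def pvSepB (c : Char) : Bool := c = ' ' || c = '\n' || c = '\t'

def is_valid_slash_command_alt (text : String) : Bool :=
  -- leading token: chars of the stripped text up to the first separator
  let token := ((PySem.Str.strip text).toList).takeWhile (fun c => !pvSepB c)
  -- single membership test against the command names
  (["/ouroboros".toList, "/ouroboros-init".toList, "/ouroboros-spec".toList,
    "/ouroboros-implement".toList, "/ouroboros-archive".toList]).contains token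

-- ===== PRECONDITION & SPEC =====
def Spec_is_valid_slash_command (text : String) (out : Bool) : Prop := out = is_valid_slash_command_alt text
instance (text : String) (out : Bool) : Decidable (Spec_is_valid_slash_command text out) := by unfold Spec_is_valid_slash_command; infer_instance

-- ===== CLAIM (what is proved, stated in full; the proofs are below) =====
def Claim_equal_is_valid_slash_command : Prop := ∀ (text : String), Dom_is_valid_slash_command text → Spec_is_valid_slash_command text (is_valid_slash_command text)

-- ===== LEMMAS AND PROOFS =====

-- one iteration of A's loop, as a predicate on a single command
def pvCheckA (cmd t : List Char) : Bool :=
  PySem.Chars.startswith t cmd && pvRestOkA (PySem.List.slice t (some (cmd.length : Int)) none)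

lemma pvLoopA_eq_any (cmds : List (List Char)) (t : List Char) :
    pvLoopA cmds t = cmds.any (fun cmd => pvCheckA cmd t) := by
  induction cmds with
  | nil => rfl
  | cons c cs ih =>
      simp only [pvLoopA, pvCheckA, List.any_cons, ih]
      by_cases h1 : PySem.Chars.startswith t c = true <;>
        by_cases h2 : pvRestOkA (PySem.List.slice t (some (c.length : Int)) none) = true <;>
        simp [h1]

lemma pvSlice_drop (t : List Char) (n : Nat) :
    PySem.List.slice t (some (n : Int)) none = t.drop n := by
  rw [PySem.List.slice_from t (Int.natCast_nonneg n)]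
  simp

-- A's per-command test succeeds iff the command equals B's leading token
lemma pvCheckA_eq_token (cmd : List Char) (hwb : cmd.all (fun c => !pvSepB c) = true) (t : List Char) :
    pvCheckA cmd t = (t.takeWhile (fun c => !pvSepB c) == cmd) := by
  have hw : ∀ c ∈ cmd, pvSepB c = false := by
    intro c hc; simpa using List.all_eq_true.mp hwb c hc
  clear hwb
  unfold pvCheckA
  rw [pvSlice_drop]
  rw [Bool.eq_iff_iff]
  simp only [Bool.and_eq_true, PySem.Chars.startswith_iff, beq_iff_eq]
  induction cmd generalizing t with
  | nil =>
      simp only [List.nil_prefix, true_and]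
      have hab : ∀ c, pvSepA c = pvSepB c := fun _ => rfl
      cases t with
      | nil => simp [pvRestOkA]
      | cons c t' =>
          cases hc : pvSepB c with
          | true => simp [pvRestOkA, hab, hc]
          | false => simp [pvRestOkA, hab, hc]
  | cons a w ih =>
      have ha : pvSepB a = false := hw a (List.mem_cons_self ..)
      have hw' : ∀ c ∈ w, pvSepB c = false := fun c hc => hw c (List.mem_cons_of_mem _ hc)
      cases t with
      | nil => simp
      | cons c t' =>
          by_cases hac : a = c
          · subst hac
            simp only [List.cons_prefix_cons, true_and, List.length_cons, List.drop_succ_cons,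
              List.takeWhile_cons, ha, Bool.not_false, if_true, List.cons.injEq]
            simpa using ih t' hw'
          · simp only [List.cons_prefix_cons, List.takeWhile_cons]
            constructor
            · rintro ⟨⟨h, -⟩, -⟩; exact absurd h hac
            · intro h
              by_cases hc : (!pvSepB c) = true
              · simp [hc] at h; exact absurd h.1.symm hac
              · simp [hc] at h

set_option maxRecDepth 4096 in
lemma pvMain (t : List Char) :
    pvLoopA pvSlashCmdsA t =
      (["/ouroboros".toList, "/ouroboros-init".toList, "/ouroboros-spec".toList,
        "/ouroboros-implement".toList, "/ouroboros-archive".toList]).contains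
        (t.takeWhile (fun c => !pvSepB c)) := by
  rw [pvLoopA_eq_any]
  simp only [pvSlashCmdsA, List.any_cons, List.any_nil, List.contains_cons,
    List.contains_nil]
  rw [pvCheckA_eq_token _ (by decide) t, pvCheckA_eq_token _ (by decide) t,
    pvCheckA_eq_token _ (by decide) t, pvCheckA_eq_token _ (by decide) t,
    pvCheckA_eq_token _ (by decide) t]

-- ===== VERDICT (by name: the statement is the Claim_ definition above) =====
theorem is_valid_slash_command_spec : Claim_equal_is_valid_slash_command := by
  intro text _
  unfold Spec_is_valid_slash_command is_valid_slash_command is_valid_slash_command_alt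
  exact pvMain _
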